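-- pv_equiv track=rewrite | github.com/emadiaz15/Administrador_peticiones | metodos_peticiones.py | scanB
-- ===== SOURCE A (Python) =====
-- def scanB(lista, actual):
--     ordenSalida = []  # Lista que contendrá el orden de búsqueda
--
--     menores = [numero for numero in lista if numero < actual]  # Sectores menores al actual
--     mayores = [numero for numero in lista if numero >= actual]  # Sectores mayores o iguales al actual
--
--     # Ordenar las listas para el escaneo
--     menores.sort(reverse=True)
--     mayores.sort()
--
--     ordenSalida.extend(menores)  # Agregar los menores primero
--     ordenSalida.extend(mayores)  # Luego los mayores
--
--     return ordenSalida  # Devolver el orden de búsqueda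
-- ===== SOURCE B (Python) =====
-- def scanB(lista, actual):
--     s = sorted(lista)
--     i = 0
--     while i < len(s) and s[i] < actual:
--         i += 1
--     return s[:i][::-1] + s[i:]
-- ===== Notes on version B (the rewrite author's own statement) =====
-- stated objective: alternative
-- what changed: One sort of the whole list plus a linear scan for the split point, returning reversed-prefix ++ suffix, instead of two filter passes each followed by its own sort.
import Mathlib
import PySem

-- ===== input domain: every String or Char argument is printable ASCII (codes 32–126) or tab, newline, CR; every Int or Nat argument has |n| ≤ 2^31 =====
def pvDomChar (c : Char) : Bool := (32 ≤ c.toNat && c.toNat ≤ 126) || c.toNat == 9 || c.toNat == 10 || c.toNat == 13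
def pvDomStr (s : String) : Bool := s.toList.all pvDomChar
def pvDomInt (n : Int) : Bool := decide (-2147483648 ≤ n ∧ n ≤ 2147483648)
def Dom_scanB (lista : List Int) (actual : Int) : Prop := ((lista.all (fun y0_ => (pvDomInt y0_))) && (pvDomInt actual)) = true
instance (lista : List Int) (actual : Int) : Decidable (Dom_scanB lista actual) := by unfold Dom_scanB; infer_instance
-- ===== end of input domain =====

-- ===== PORT A =====
-- A: two filters, two sorts (descending / ascending), concatenated.
def scanB (lista : List Int) (actual : Int) : List Int :=
  let ordenSalida : List Int := []
  let menores := lista.filter (fun numero => numero < actual)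
  let mayores := lista.filter (fun numero => actual ≤ numero)
  let menores := PySem.List.sorted menores (fun x => x) true
  let mayores := PySem.List.sorted mayores (fun x => x) false
  (ordenSalida ++ menores) ++ mayores

-- ===== PORT B =====
-- B: sort once, scan for the first element ≥ actual, return reversed prefix ++ suffix.
def splitIdx (s : List Int) (actual : Int) : Nat :=
  match s with
  | [] => 0
  | x :: xs => if x < actual then splitIdx xs actual + 1 else 0

def scanB_alt (lista : List Int) (actual : Int) : List Int :=
  let s := PySem.List.sorted lista (fun x => x) false
  let i := splitIdx s actual
  (s.take i).reverse ++ s.drop i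

-- ===== PRECONDITION & SPEC =====
def Spec_scanB (lista : List Int) (actual : Int) (out : List Int) : Prop := out = scanB_alt lista actual
instance (lista : List Int) (actual : Int) (out : List Int) : Decidable (Spec_scanB lista actual out) := by unfold Spec_scanB; infer_instance

-- ===== CLAIM (what is proved, stated in full; the proofs are below) =====
def Claim_equal_scanB : Prop := ∀ (lista : List Int) (actual : Int), Dom_scanB lista actual → Spec_scanB lista actual (scanB lista actual)

-- ===== LEMMAS AND PROOFS =====

lemma splitIdx_append (p q : List Int) (a : Int)
    (hp : ∀ x ∈ p, x < a) (hq : ∀ x ∈ q, a ≤ x) :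
    splitIdx (p ++ q) a = p.length := by
  induction p with
  | nil =>
    cases q with
    | nil => rfl
    | cons y ys =>
      simp [splitIdx, not_lt.mpr (hq y (by simp))]
  | cons x xs ih =>
    have hx : x < a := hp x (by simp)
    simp [splitIdx, hx, ih (fun y hy => hp y (by simp [hy]))]

lemma sorted_rev_eq_reverse_sorted (l : List Int) :
    PySem.List.sorted l (fun x => x) true = (PySem.List.sorted l (fun x => x) false).reverse := by
  apply PySem.List.eq_of_perm_of_pairwise_le_of_injective (fun x : Int => -x) neg_injective
  · exact ((PySem.List.sorted_perm l _ true).trans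
      ((PySem.List.sorted_perm l _ false).symm)).trans (List.reverse_perm _).symm
  · have := PySem.List.sorted_pairwise_rev (xs := l) (key := fun x : Int => x)
    exact this.imp (by intro a b h; simpa using h)
  · rw [List.pairwise_reverse]
    have := PySem.List.sorted_pairwise (xs := l) (key := fun x : Int => x)
    exact this.imp (by intro a b h; simpa using h)

lemma sorted_split (lista : List Int) (actual : Int) :
    PySem.List.sorted lista (fun x => x) false =
      PySem.List.sorted (lista.filter (fun n => n < actual)) (fun x => x) false ++
      PySem.List.sorted (lista.filter (fun n => actual ≤ n)) (fun x => x) false := by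
  apply PySem.List.sorted_id_eq_of_perm_of_pairwise
  · refine ((PySem.List.sorted_perm _ _ _).append (PySem.List.sorted_perm _ _ _)).trans ?_
    have h2 : lista.filter (fun n => decide (actual ≤ n)) =
        lista.filter (fun n => !decide (n < actual)) := by
      apply List.filter_congr; intro x _; rw [← decide_not]; exact decide_eq_decide.mpr not_lt.symm
    rw [h2]
    exact List.filter_append_perm _ _
  · rw [List.pairwise_append]
    refine ⟨?_, ?_, ?_⟩
    · have := PySem.List.sorted_pairwise (xs := lista.filter (fun n => n < actual)) (key := fun x : Int => x)
      exact this.imp (by intro a b h; simpa using h)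
    · have := PySem.List.sorted_pairwise (xs := lista.filter (fun n => actual ≤ n)) (key := fun x : Int => x)
      exact this.imp (by intro a b h; simpa using h)
    · intro x hx y hy
      have hx' : x < actual := by
        have := (PySem.List.mem_sorted _ _ _ _).1 hx
        simpa using (List.of_mem_filter this)
      have hy' : actual ≤ y := by
        have := (PySem.List.mem_sorted _ _ _ _).1 hy
        simpa using (List.of_mem_filter this)
      exact le_of_lt (lt_of_lt_of_le hx' hy')

-- ===== VERDICT (by name: the statement is the Claim_ definition above) =====
theorem scanB_spec : Claim_equal_scanB := by
  intro lista actual _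
  unfold Spec_scanB scanB scanB_alt
  simp only []
  rw [sorted_split lista actual]
  set p := PySem.List.sorted (lista.filter (fun n => n < actual)) (fun x => x) false with hp
  set q := PySem.List.sorted (lista.filter (fun n => actual ≤ n)) (fun x => x) false with hq
  have hi : splitIdx (p ++ q) actual = p.length := by
    apply splitIdx_append
    · intro x hx
      have := (PySem.List.mem_sorted _ _ _ _).1 hx
      simpa using (List.of_mem_filter this)
    · intro x hx
      have := (PySem.List.mem_sorted _ _ _ _).1 hx
      simpa using (List.of_mem_filter this)
  rw [hi, List.take_left' rfl, List.drop_left' rfl, sorted_rev_eq_reverse_sorted]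
  rfl
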